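-- pv_equiv track=rewrite | github.com/nhsengland/privfp-poc | src/privacy_fingerprint/extract/aws_comprehend.py | _sorted_mention
-- ===== SOURCE A (Python) =====
-- from collections import defaultdict
--
-- def _sorted_mention(entities, key):
--     freq = defaultdict(int)
--     for entity in entities:
--         freq[entity[key]] += 1
--     if len(freq) == 0:
--         return None
--     return [
--         i[0] for i in sorted(freq.items(), key=lambda x: x[1], reverse=True)
--     ]
-- ===== SOURCE B (Python) =====
-- def _sorted_mention(entities, key):
--     freq = {}
--     for entity in entities:
--         k = entity[key]
--         freq[k] = freq.get(k, 0) + 1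
--     if not freq:
--         return None
--     by_count = {}
--     for k, c in freq.items():
--         by_count.setdefault(c, []).append(k)
--     return [k for c in sorted(by_count, reverse=True) for k in by_count[c]]
-- ===== Notes on version B (the rewrite author's own statement) =====
-- stated objective: alternative
-- what changed: B groups the keys by their count into a dict and sorts only the distinct counts descending, instead of A's comparison sort of all (key, count) items; Pre_ excludes inputs where some entity lacks the key, on which both Pythons raise KeyError.
import Mathlib
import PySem

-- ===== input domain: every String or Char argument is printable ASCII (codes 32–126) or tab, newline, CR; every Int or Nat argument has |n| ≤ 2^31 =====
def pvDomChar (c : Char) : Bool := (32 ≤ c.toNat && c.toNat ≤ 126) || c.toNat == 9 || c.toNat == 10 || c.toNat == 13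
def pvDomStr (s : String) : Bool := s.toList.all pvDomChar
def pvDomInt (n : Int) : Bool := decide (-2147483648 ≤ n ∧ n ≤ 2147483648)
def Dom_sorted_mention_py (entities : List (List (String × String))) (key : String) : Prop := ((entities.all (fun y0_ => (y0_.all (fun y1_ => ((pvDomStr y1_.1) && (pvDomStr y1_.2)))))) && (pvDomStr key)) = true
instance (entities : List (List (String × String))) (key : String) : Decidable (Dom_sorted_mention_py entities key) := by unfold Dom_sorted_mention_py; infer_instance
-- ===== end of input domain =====

-- B groups the keys by their count and sorts only the distinct counts descending,
-- instead of A's comparison sort of all (key, count) items; same return value.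

-- ===== PORT A =====
-- shared counting loop of both Pythons: freq[entity[key]] += 1 over the entities.
-- 'entity[key]' raises KeyError when 'key' is absent — Pre_ excludes those inputs,
-- so the default "" of getD is only reached outside Pre_.
def pvFreq (entities : List (List (String × String))) (key : String) : PySem.Dict String Int :=
  entities.foldl
    (fun freq entity =>
      freq.insert (PySem.Dict.getD ⟨entity⟩ key "")
        (freq.getD (PySem.Dict.getD ⟨entity⟩ key "") 0 + 1))
    ⟨[]⟩

def sorted_mention_py (entities : List (List (String × String))) (key : String) : Option (List String) :=
  if (pvFreq entities key).items.length = 0 then none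
  else
    some ((PySem.List.sorted (pvFreq entities key).items (fun x => x.2) true).map (fun i => i.1))

-- ===== PORT B =====
-- by_count.setdefault(c, []).append(k): overwrite bucket c with its list extended by k
def pvBuckets (items : List (String × Int)) : PySem.Dict Int (List String) :=
  items.foldl (fun b kv => b.insert kv.2 (b.getD kv.2 [] ++ [kv.1])) ⟨[]⟩

def sorted_mention_py_alt (entities : List (List (String × String))) (key : String) : Option (List String) :=
  if (pvFreq entities key).items.length = 0 then none
  else
    -- 'by_count[c]' for c drawn from by_count's own keys always hits; getD's default [] is unreachable
    some ((PySem.List.sorted (pvBuckets (pvFreq entities key).items).keys (fun c => c) true).flatMap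
      (fun c => (pvBuckets (pvFreq entities key).items).getD c []))

-- ===== PRECONDITION & SPEC =====
-- Pre_ excludes exactly the inputs where some entity lacks 'key': there Python A
-- (and Python B alike) raises KeyError instead of returning.
def Pre_sorted_mention_py (entities : List (List (String × String))) (key : String) : Prop :=
  ∀ e ∈ entities, key ∈ e.map Prod.fst

instance (entities : List (List (String × String))) (key : String) : Decidable (Pre_sorted_mention_py entities key) := by unfold Pre_sorted_mention_py; infer_instance

def pvWitness_sorted_mention_py : (List (List (String × String))) × String :=
  ([[("t", "a")], [("t", "b")], [("t", "a")]], "t")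

def Spec_sorted_mention_py (entities : List (List (String × String))) (key : String) (out : Option (List String)) : Prop := out = sorted_mention_py_alt entities key
instance (entities : List (List (String × String))) (key : String) (out : Option (List String)) : Decidable (Spec_sorted_mention_py entities key out) := by unfold Spec_sorted_mention_py; infer_instance

-- ===== CLAIM (what is proved, stated in full; the proofs are below) =====
def Claim_equal_sorted_mention_py : Prop := ∀ (entities : List (List (String × String))) (key : String), Dom_sorted_mention_py entities key → Pre_sorted_mention_py entities key → Spec_sorted_mention_py entities key (sorted_mention_py entities key)

-- ===== LEMMAS AND PROOFS =====

-- membership in the items of an overwriting insert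
theorem pv_mem_items_insert {κ ν : Type} [BEq κ] (d : PySem.Dict κ ν) (k : κ) (v : ν)
    (p : κ × ν) (hp : p ∈ (d.insert k v).items) : p = (k, v) ∨ p ∈ d.items := by
  unfold PySem.Dict.insert at hp
  split at hp
  · simp only [List.mem_map] at hp
    obtain ⟨q, hq, hqe⟩ := hp
    by_cases h : (q.1 == k) = true
    · left; rw [← hqe]; simp [h]
    · right; rw [← hqe]; simpa [h] using hq
  · rcases List.mem_append.mp hp with h | h
    · right; exact h
    · left; simpa using h

-- a looked-up value is one of the dict's stored values
theorem pv_getD_mem {κ ν : Type} [BEq κ] (d : PySem.Dict κ ν) (k : κ) (d0 : ν) :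
    d.getD k d0 = d0 ∨ ∃ p ∈ d.items, d.getD k d0 = p.2 := by
  unfold PySem.Dict.getD PySem.Dict.get?
  cases hf : d.items.find? (fun p => p.1 == k) with
  | none => left; rfl
  | some q => right; exact ⟨q, List.mem_of_find?_eq_some hf, rfl⟩

-- every count in the frequency table is at least 1
theorem pv_freq_pos_aux (entities : List (List (String × String))) (key : String)
    (d : PySem.Dict String Int) (hd : ∀ p ∈ d.items, 1 ≤ p.2) :
    ∀ p ∈ (entities.foldl
      (fun freq entity =>
        freq.insert (PySem.Dict.getD ⟨entity⟩ key "")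
          (freq.getD (PySem.Dict.getD ⟨entity⟩ key "") 0 + 1)) d).items, 1 ≤ p.2 := by
  induction entities generalizing d with
  | nil => simpa using hd
  | cons e es ih =>
    simp only [List.foldl_cons]
    apply ih
    intro p hp
    rcases pv_mem_items_insert _ _ _ _ hp with h | h
    · have h0 : (0 : Int) ≤ d.getD (PySem.Dict.getD ⟨e⟩ key "") 0 := by
        rcases pv_getD_mem d (PySem.Dict.getD ⟨e⟩ key "") 0 with h' | ⟨q, hq, h'⟩
        · rw [h']
        · rw [h']; exact le_trans (by norm_num) (hd q hq)
      rw [h]; simpa using by omega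
    · exact hd p h

theorem pv_freq_pos (entities : List (List (String × String))) (key : String) :
    ∀ p ∈ (pvFreq entities key).items, 1 ≤ p.2 :=
  pv_freq_pos_aux entities key ⟨[]⟩ (by simp)

-- running max of a list bounds every element
theorem pv_foldl_max_bound (l : List Int) (a : Int) :
    a ≤ l.foldl max a ∧ ∀ x ∈ l, x ≤ l.foldl max a := by
  induction l generalizing a with
  | nil => simp
  | cons y t ih =>
    obtain ⟨h1, h2⟩ := ih (max a y)
    refine ⟨le_trans (le_max_left a y) h1, ?_⟩
    intro x hx
    rcases List.mem_cons.mp hx with rfl | hx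
    · exact le_trans (le_max_right a x) h1
    · exact h2 x hx

-- the bucket dictionary's entry at c is exactly the keys whose count is c, in order
theorem pv_buckets_getD (xs : List (String × Int)) (b : PySem.Dict Int (List String)) (c : Int) :
    (xs.foldl (fun b kv => b.insert kv.2 (b.getD kv.2 [] ++ [kv.1])) b).getD c []
      = b.getD c [] ++ (xs.filter (fun p => decide (p.2 = c))).map (fun p => p.1) := by
  induction xs generalizing b with
  | nil => simp
  | cons kv xs ih =>
    simp only [List.foldl_cons]
    rw [ih]
    by_cases h : c = kv.2
    · simp [h]
    · have h' : ¬ kv.2 = c := fun hh => h hh.symm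
      simp [PySem.Dict.getD_insert, h, h']

-- the bucket dictionary's keys are exactly the counts occurring in xs (plus b's keys)
theorem pv_buckets_keys_mem (xs : List (String × Int)) (b : PySem.Dict Int (List String)) (c : Int) :
    c ∈ (xs.foldl (fun b kv => b.insert kv.2 (b.getD kv.2 [] ++ [kv.1])) b).keys
      ↔ c ∈ xs.map (fun p => p.2) ∨ c ∈ b.keys := by
  induction xs generalizing b with
  | nil => simp
  | cons kv xs ih =>
    simp only [List.foldl_cons]
    rw [ih, PySem.Dict.mem_keys_insert]
    simp only [List.map_cons, List.mem_cons]
    tauto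

-- the bucket dictionary's keys are distinct
theorem pv_buckets_keys_nodup (xs : List (String × Int)) (b : PySem.Dict Int (List String))
    (hb : b.keys.Nodup) :
    (xs.foldl (fun b kv => b.insert kv.2 (b.getD kv.2 [] ++ [kv.1])) b).keys.Nodup := by
  induction xs generalizing b with
  | nil => simpa using hb
  | cons kv xs ih =>
    simp only [List.foldl_cons]
    exact ih _ (PySem.Dict.nodup_keys_insert _ _ _ hb)

-- two strictly decreasing Int lists with the same members are equal
theorem pv_sorted_gt_ext (L1 : List Int) : ∀ (L2 : List Int),
    L1.Pairwise (· > ·) → L2.Pairwise (· > ·) → (∀ x, x ∈ L1 ↔ x ∈ L2) → L1 = L2 := by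
  induction L1 with
  | nil =>
    intro L2 _ _ hm
    cases L2 with
    | nil => rfl
    | cons b s => exact absurd ((hm b).mpr (by simp)) (by simp)
  | cons a t ih =>
    intro L2 h1 h2 hm
    cases L2 with
    | nil => exact absurd ((hm a).mp (by simp)) (by simp)
    | cons b s =>
      have hab : a = b := by
        have ha : a = b ∨ a ∈ s := List.mem_cons.mp ((hm a).mp (by simp))
        have hb : b = a ∨ b ∈ t := List.mem_cons.mp ((hm b).mpr (by simp))
        rcases ha with h | h
        · exact h
        · have hba : b > a := List.rel_of_pairwise_cons h2 h
          rcases hb with h' | h'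
          · omega
          · have : a > b := List.rel_of_pairwise_cons h1 h'
            omega
      subst hab
      have hts : ∀ x, x ∈ t ↔ x ∈ s := by
        intro x
        constructor
        · intro hx
          have hlt : a > x := List.rel_of_pairwise_cons h1 hx
          rcases List.mem_cons.mp ((hm x).mp (List.mem_cons_of_mem _ hx)) with rfl | h
          · omega
          · exact h
        · intro hx
          have hlt : a > x := List.rel_of_pairwise_cons h2 hx
          rcases List.mem_cons.mp ((hm x).mpr (List.mem_cons_of_mem _ hx)) with rfl | h
          · omega
          · exact h
      rw [ih s (List.Pairwise.of_cons h1) (List.Pairwise.of_cons h2) hts]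

theorem pv_flatMap_congr {α β : Type} {l : List α} {f g : α → List β}
    (h : ∀ a ∈ l, f a = g a) : l.flatMap f = l.flatMap g := by
  induction l with
  | nil => rfl
  | cons x xs ih =>
    simp only [List.flatMap_cons]
    rw [h x (by simp), ih (fun a ha => h a (by simp [ha]))]

-- flatMap ignores elements whose image is empty
theorem pv_flatMap_filter {β : Type} (L : List Int) (g : Int → List β) (P : Int → Bool)
    (h : ∀ c ∈ L, P c = false → g c = []) : L.flatMap g = (L.filter P).flatMap g := by
  induction L with
  | nil => rfl
  | cons c L ih =>
    have ih' := ih (fun x hx hPx => h x (by simp [hx]) hPx)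
    by_cases hc : P c = true
    · simp [List.flatMap_cons, hc, ih']
    · have h0 : g c = [] := h c (by simp) (by simpa using hc)
      simp [List.flatMap_cons, hc, h0, ih']

-- inserting x into "all-not-smaller ++ all-smaller" drops x exactly in the middle
theorem pv_insertBy_split (x : String × Int) (P S : List (String × Int))
    (hP : ∀ p ∈ P, ¬ p.2 < x.2) (hS : ∀ s ∈ S, s.2 < x.2) :
    PySem.List.insertBy (fun a b => decide (b.2 < a.2)) x (P ++ S) = P ++ x :: S := by
  induction P with
  | nil =>
    cases S with
    | nil => rfl
    | cons s t => simp [PySem.List.insertBy, hS s (by simp)]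
  | cons p P ih =>
    have hp0 : ¬ p.2 < x.2 := hP p (by simp)
    simp [List.cons_append, PySem.List.insertBy, hp0,
      ih (fun q hq => hP q (List.mem_cons_of_mem _ hq))]

-- the stable reverse sort by count is the concatenation of the count-classes,
-- from the largest count down
theorem pv_sorted_rev_flatMap (xs : List (String × Int)) (M : Int)
    (h : ∀ p ∈ xs, 1 ≤ p.2 ∧ p.2 ≤ M) :
    PySem.List.sorted xs (fun p => p.2) true
      = ((PySem.List.pyRange 1 (M + 1)).reverse).flatMap
          (fun c => xs.filter (fun p => decide (p.2 = c))) := by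
  induction xs using List.reverseRecOn with
  | nil =>
    rw [(PySem.List.sorted_eq_nil_iff ([] : List (String × Int)) (fun p => p.2) true).mpr rfl]
    simp
  | append_singleton xs x ih =>
    obtain ⟨hx1, hx2⟩ := h x (by simp)
    have hxs : ∀ p ∈ xs, 1 ≤ p.2 ∧ p.2 ≤ M := fun p hp => h p (by simp [hp])
    have hstep : PySem.List.sorted (xs ++ [x]) (fun p => p.2) true
        = PySem.List.insertBy (fun a b => decide (b.2 < a.2)) x
            (PySem.List.sorted xs (fun p => p.2) true) := by
      simp only [PySem.List.sorted_rev_eq_foldl_insertBy, List.foldl_append, List.foldl_cons,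
        List.foldl_nil]
    have h1 : PySem.List.pyRange 1 (M + 1)
        = PySem.List.pyRange 1 x.2 ++ (x.2 :: PySem.List.pyRange (x.2 + 1) (M + 1)) := by
      rw [PySem.List.pyRange_one_append 1 x.2 (M + 1) hx1 (by omega),
        PySem.List.pyRange_one_cons (a := x.2) (b := M + 1) (by omega)]
    rw [hstep, ih hxs, h1]
    simp only [List.reverse_append, List.reverse_cons, List.flatMap_append, List.flatMap_cons,
      List.flatMap_nil, List.append_nil]
    have hhigh : ∀ c ∈ (PySem.List.pyRange (x.2 + 1) (M + 1)).reverse,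
        (xs ++ [x]).filter (fun p => decide (p.2 = c)) = xs.filter (fun p => decide (p.2 = c)) := by
      intro c hc
      rw [List.mem_reverse, PySem.List.mem_pyRange_one] at hc
      have : ¬ x.2 = c := by omega
      simp [List.filter_append, this]
    have hlow : ∀ c ∈ (PySem.List.pyRange 1 x.2).reverse,
        (xs ++ [x]).filter (fun p => decide (p.2 = c)) = xs.filter (fun p => decide (p.2 = c)) := by
      intro c hc
      rw [List.mem_reverse, PySem.List.mem_pyRange_one] at hc
      have : ¬ x.2 = c := by omega
      simp [List.filter_append, this]
    have hown : (xs ++ [x]).filter (fun p => decide (p.2 = x.2))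
        = xs.filter (fun p => decide (p.2 = x.2)) ++ [x] := by
      simp [List.filter_append]
    rw [pv_flatMap_congr hhigh, pv_flatMap_congr hlow, hown]
    have hP : ∀ p ∈ ((PySem.List.pyRange (x.2 + 1) (M + 1)).reverse).flatMap
          (fun c => xs.filter (fun p => decide (p.2 = c)))
          ++ xs.filter (fun p => decide (p.2 = x.2)), ¬ p.2 < x.2 := by
      intro p hp
      rcases List.mem_append.mp hp with hp | hp
      · obtain ⟨c, hc, hpc⟩ := List.mem_flatMap.mp hp
        rw [List.mem_reverse, PySem.List.mem_pyRange_one] at hc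
        have := (List.mem_filter.mp hpc).2
        simp only [decide_eq_true_eq] at this
        omega
      · have := (List.mem_filter.mp hp).2
        simp only [decide_eq_true_eq] at this
        omega
    have hS : ∀ s ∈ ((PySem.List.pyRange 1 x.2).reverse).flatMap
          (fun c => xs.filter (fun p => decide (p.2 = c))), s.2 < x.2 := by
      intro s hs
      obtain ⟨c, hc, hsc⟩ := List.mem_flatMap.mp hs
      rw [List.mem_reverse, PySem.List.mem_pyRange_one] at hc
      have := (List.mem_filter.mp hsc).2
      simp only [decide_eq_true_eq] at this
      omega
    have := pv_insertBy_split x _ _ hP hS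
    rw [this]
    simp

-- ===== VERDICT (by name: the statement is the Claim_ definition above) =====
theorem sorted_mention_py_spec : Claim_equal_sorted_mention_py := by
  intro entities key _hdom _hpre
  unfold Spec_sorted_mention_py sorted_mention_py sorted_mention_py_alt
  cases hI : (pvFreq entities key).items with
  | nil => simp
  | cons q qs =>
    simp only [List.length_cons]
    rw [if_neg (by omega), if_neg (by omega)]
    set xs := q :: qs with hxs
    set M : Int := ((xs.map (fun p => p.2)).foldl max q.2) with hM
    have hbound : ∀ p ∈ xs, 1 ≤ p.2 ∧ p.2 ≤ M := by
      intro p hp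
      refine ⟨?_, ?_⟩
      · have := pv_freq_pos entities key
        rw [hI] at this
        exact this p hp
      · exact (pv_foldl_max_bound (xs.map (fun p => p.2)) q.2).2 p.2
          (List.mem_map.mpr ⟨p, hp, rfl⟩)
    congr 1
    -- buckets' lookups are the count-classes
    have hbg : ∀ c : Int, (pvBuckets xs).getD c []
        = (xs.filter (fun p => decide (p.2 = c))).map (fun p => p.1) := by
      intro c
      unfold pvBuckets
      rw [pv_buckets_getD]
      simp [PySem.Dict.getD, PySem.Dict.get?]
    have hkeys : ∀ c : Int, c ∈ (pvBuckets xs).keys ↔ c ∈ xs.map (fun p => p.2) := by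
      intro c
      unfold pvBuckets
      rw [pv_buckets_keys_mem]
      simp [PySem.Dict.keys]
    rw [pv_sorted_rev_flatMap xs M hbound, List.map_flatMap,
      pv_flatMap_congr (fun c _ => hbg c)]
    -- restrict the full count range to the counts that actually occur
    rw [pv_flatMap_filter ((PySem.List.pyRange 1 (M + 1)).reverse)
      (fun c => (xs.filter (fun p => decide (p.2 = c))).map (fun p => p.1))
      (fun c => decide (c ∈ (pvBuckets xs).keys))
      (by
        intro c _ hPc
        have hnc : c ∉ xs.map (fun p => p.2) := by
          intro hmem
          exact absurd (decide_eq_true ((hkeys c).mpr hmem)) (by simp [hPc])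
        have : xs.filter (fun p => decide (p.2 = c)) = [] := by
          rw [List.filter_eq_nil_iff]
          intro p hp hpc
          simp only [decide_eq_true_eq] at hpc
          exact hnc (List.mem_map.mpr ⟨p, hp, hpc⟩)
        simp [this])]
    -- the filtered range IS the sorted distinct counts, descending
    have hfe : ((PySem.List.pyRange 1 (M + 1)).reverse).filter
          (fun c => decide (c ∈ (pvBuckets xs).keys))
        = PySem.List.sorted (pvBuckets xs).keys (fun c => c) true := by
      apply pv_sorted_gt_ext
      · exact List.Pairwise.filter _
          ((List.pairwise_reverse).mpr
            (by simpa using PySem.List.pairwise_lt_pyRange_one (a := 1) (b := M + 1)))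
      · have hperm := PySem.List.sorted_perm (pvBuckets xs).keys (fun c => c) true
        have hnd : (PySem.List.sorted (pvBuckets xs).keys (fun c => c) true).Nodup :=
          hperm.nodup_iff.mpr (pv_buckets_keys_nodup xs ⟨[]⟩ (by simp [PySem.Dict.keys]))
        have hge := PySem.List.sorted_pairwise_rev (pvBuckets xs).keys (fun c => c)
        exact (hge.and hnd).imp (fun {a b} h => lt_of_le_of_ne h.1 (fun e => h.2 e.symm))
      · intro x
        rw [List.mem_filter, List.mem_reverse, PySem.List.mem_pyRange_one,
          PySem.List.mem_sorted]
        constructor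
        · intro ⟨_, h2⟩
          simpa using h2
        · intro hx
          have hx' := (hkeys x).mp hx
          obtain ⟨p, hp, rfl⟩ := List.mem_map.mp hx'
          obtain ⟨h1, h2⟩ := hbound p hp
          exact ⟨⟨h1, by omega⟩, by simpa using hx⟩
    rw [hfe, pv_flatMap_congr (fun c _ => (hbg c).symm)]
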